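-- pv_equiv track=rewrite | github.com/MeirNizri/Python-Assignments | Python Exercise 3/bounded_subsets.py | find_bounded_subsets
-- ===== SOURCE A (Python) =====
-- def find_bounded_subsets(lst: list, lim: int):
--     if any(elem < 0 for elem in lst) or lim < 0:
--         raise TypeError("the list and limit must be all positive")
--
--     # if the list is empty return empty list
--     if not lst:
--         return []
--
--     # get in recursion all valid subsets that doesn't contain the last element
--     last_elem = lst[-1]
--     ans_without_last = find_bounded_subsets(lst[:-1], lim)
--
--     ans_with_last = []
--     if last_elem <= lim:
--         ans_with_last.append([last_elem])
--
--     # For each valid subset check whether adding the last element also yields a valid subset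
--     for subset in ans_without_last:
--         if sum(subset)+last_elem <= lim:
--             ans_with_last.append(subset+[last_elem])
--
--     return ans_without_last + ans_with_last + []
-- ===== SOURCE B (Python) =====
-- def find_bounded_subsets(lst: list, lim: int):
--     if any(elem < 0 for elem in lst) or lim < 0:
--         raise TypeError("the list and limit must be all positive")
--     # iterative left-to-right: result holds all valid non-empty subsets of the prefix seen so far
--     result = []
--     for x in lst:
--         new = [[x]] if x <= lim else []
--         new += [s + [x] for s in result if sum(s) + x <= lim]
--         result = result + new
--     return result
-- ===== Notes on version B (the rewrite author's own statement) =====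
-- stated objective: simpler
-- what changed: Replaced the right-recursion on lst[:-1] with a single iterative left-to-right accumulation loop (a fold extending the running subset list with each element), removing recursion and list slicing.
import Mathlib
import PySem

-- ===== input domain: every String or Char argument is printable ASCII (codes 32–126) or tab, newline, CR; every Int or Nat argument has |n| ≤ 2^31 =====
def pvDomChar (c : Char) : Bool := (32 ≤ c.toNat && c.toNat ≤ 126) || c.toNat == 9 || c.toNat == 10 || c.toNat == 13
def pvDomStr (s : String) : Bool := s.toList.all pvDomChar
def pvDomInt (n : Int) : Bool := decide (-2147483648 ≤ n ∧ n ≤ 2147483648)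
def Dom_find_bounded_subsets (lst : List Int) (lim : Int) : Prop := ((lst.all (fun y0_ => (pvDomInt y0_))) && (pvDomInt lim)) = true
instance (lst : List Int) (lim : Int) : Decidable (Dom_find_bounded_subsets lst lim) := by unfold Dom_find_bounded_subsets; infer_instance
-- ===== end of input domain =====

-- B replaces A's right-recursion on lst[:-1] by one iterative left-to-right accumulation loop (objective: simpler).

-- ===== PORT A =====
-- recursion on lst[:-1]; for the nonempty lst of this branch, lst[-1] = getLast and lst[:-1] = dropLast (exact)
def find_bounded_subsets (lst : List Int) (lim : Int) : List (List Int) :=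
  if _h : lst = [] then []
  else
    let last_elem := (lst.getLast?).getD 0
    let ans_without_last := find_bounded_subsets lst.dropLast lim
    let ans_with_last := if last_elem ≤ lim then [[last_elem]] else []
    -- 'for subset in ans_without_last: if sum(subset)+last_elem <= lim: ans_with_last.append(subset+[last_elem])'
    let ans_with_last := ans_without_last.foldl
      (fun acc subset => if subset.sum + last_elem ≤ lim then acc ++ [subset ++ [last_elem]] else acc)
      ans_with_last
    ans_without_last ++ ans_with_last ++ []
termination_by lst.length
decreasing_by
  simpa [List.length_dropLast] using Nat.sub_lt (List.length_pos_of_ne_nil _h) Nat.one_pos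

-- ===== PORT B =====
-- one iteration of B's loop body: new = ([x] if x<=lim) + comprehension; result = result + new
def pvStep (lim : Int) (result : List (List Int)) (x : Int) : List (List Int) :=
  let new := (if x ≤ lim then [[x]] else []) ++
    ((result.filter (fun s => decide (s.sum + x ≤ lim))).map (fun s => s ++ [x]))
  result ++ new

def find_bounded_subsets_alt (lst : List Int) (lim : Int) : List (List Int) :=
  lst.foldl (pvStep lim) []

-- ===== PRECONDITION & SPEC =====
-- Pre_ excludes exactly the inputs on which Python A raises TypeError: a negative element or a negative limit.
def Pre_find_bounded_subsets (lst : List Int) (lim : Int) : Prop :=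
  (∀ x ∈ lst, 0 ≤ x) ∧ 0 ≤ lim
instance (lst : List Int) (lim : Int) : Decidable (Pre_find_bounded_subsets lst lim) := by
  unfold Pre_find_bounded_subsets; infer_instance

def pvWitness_find_bounded_subsets : List Int × Int := ([1, 2, 2], 4)

def Spec_find_bounded_subsets (lst : List Int) (lim : Int) (out : List (List Int)) : Prop := out = find_bounded_subsets_alt lst lim
instance (lst : List Int) (lim : Int) (out : List (List Int)) : Decidable (Spec_find_bounded_subsets lst lim out) := by unfold Spec_find_bounded_subsets; infer_instance

-- ===== CLAIM (what is proved, stated in full; the proofs are below) =====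
def Claim_equal_find_bounded_subsets : Prop := ∀ (lst : List Int) (lim : Int), Dom_find_bounded_subsets lst lim → Pre_find_bounded_subsets lst lim → Spec_find_bounded_subsets lst lim (find_bounded_subsets lst lim)

-- ===== LEMMAS AND PROOFS =====

-- A's inner append-loop equals B's comprehension (filter + map)
theorem pv_inner_loop (R : List (List Int)) (x lim : Int) (acc : List (List Int)) :
    R.foldl (fun acc subset => if subset.sum + x ≤ lim then acc ++ [subset ++ [x]] else acc) acc
    = acc ++ ((R.filter (fun s => decide (s.sum + x ≤ lim))).map (fun s => s ++ [x])) := by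
  induction R generalizing acc with
  | nil => simp
  | cons s R ih =>
    by_cases h : s.sum + x ≤ lim <;> simp [List.foldl_cons, h, ih]

-- A on lst ++ [x] is exactly one B-step applied to A on lst
theorem pv_keyA (l : List Int) (x lim : Int) :
    find_bounded_subsets (l ++ [x]) lim = pvStep lim (find_bounded_subsets l lim) x := by
  rw [find_bounded_subsets]
  simp [pv_inner_loop, pvStep]

-- A equals the fold, on all inputs
theorem pv_eq_fold (lst : List Int) (lim : Int) :
    find_bounded_subsets lst lim = find_bounded_subsets_alt lst lim := by
  induction lst using List.reverseRecOn with
  | nil => simp [find_bounded_subsets, find_bounded_subsets_alt]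
  | append_singleton l x ih =>
    rw [pv_keyA, ih]
    simp [find_bounded_subsets_alt, List.foldl_append]

-- ===== VERDICT (by name: the statement is the Claim_ definition above) =====
theorem find_bounded_subsets_spec : Claim_equal_find_bounded_subsets := by
  intro lst lim _ _
  exact pv_eq_fold lst lim
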